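-- pv_equiv track=rewrite | github.com/mathensley/Algoritmos_Python | greedy/pendrive.py | pendrive
-- ===== SOURCE A (Python) =====
-- def pendrive(t, c):
--     i = 0
--     x = []
--     while i < len(t) and t[i] <= c:
--         x.append(t[i])
--         c = c - t[i]
--         i += 1
--     return x
-- ===== SOURCE B (Python) =====
-- from itertools import accumulate
--
-- def pendrive(t, c):
--     # Staged decomposition: (1) materialize the prefix sums of t,
--     # (2) locate the first index whose prefix sum exceeds c,
--     # (3) return the corresponding slice of t.  No output list is
--     # built element by element and no capacity is decremented.
--     sums = list(accumulate(t))
--     k = next((i for i, s in enumerate(sums) if s > c), len(t))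
--     return t[:k]
-- ===== Notes on version B (the rewrite author's own statement) =====
-- stated objective: alternative
-- what changed: Replaced the single-pass append loop with a decreasing remaining capacity by three staged passes: materialize the prefix-sum list, find the index of the first prefix sum exceeding the fixed c, and return the slice t[:k].
import Mathlib
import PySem

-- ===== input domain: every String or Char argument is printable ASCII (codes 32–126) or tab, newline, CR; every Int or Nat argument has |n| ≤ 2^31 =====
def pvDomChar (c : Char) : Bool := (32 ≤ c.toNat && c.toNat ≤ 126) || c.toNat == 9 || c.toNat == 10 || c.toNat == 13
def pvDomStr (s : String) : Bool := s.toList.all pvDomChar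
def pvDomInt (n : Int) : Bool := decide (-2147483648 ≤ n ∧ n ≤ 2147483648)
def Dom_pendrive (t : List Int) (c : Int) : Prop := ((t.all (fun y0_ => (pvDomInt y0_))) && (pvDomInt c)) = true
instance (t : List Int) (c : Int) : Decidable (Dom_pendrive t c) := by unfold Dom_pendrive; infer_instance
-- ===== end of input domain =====

-- B replaces A's append-and-decrement loop by three staged passes (prefix sums, first-overflow index, slice); alternative decomposition, same cost.
-- ===== PORT A =====
def pendrive (t : List Int) (c : Int) : List Int :=
  match t with
  | [] => []
  | x :: xs => if x ≤ c then x :: pendrive xs (c - x) else []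

-- ===== PORT B =====
-- stage 1: prefix sums of t (Python's itertools.accumulate)
def pendriveAccum (t : List Int) (s : Int) : List Int :=
  match t with
  | [] => []
  | x :: xs => (s + x) :: pendriveAccum xs (s + x)

-- stage 2: index of the first prefix sum exceeding c (length if none)
def pendriveFirstOver (sums : List Int) (c : Int) : Nat :=
  match sums with
  | [] => 0
  | s :: ss => if s > c then 0 else 1 + pendriveFirstOver ss c

-- stage 3: slice t[:k]
def pendrive_alt (t : List Int) (c : Int) : List Int :=
  t.take (pendriveFirstOver (pendriveAccum t 0) c)

-- ===== PRECONDITION & SPEC =====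
def Spec_pendrive (t : List Int) (c : Int) (out : List Int) : Prop := out = pendrive_alt t c
instance (t : List Int) (c : Int) (out : List Int) : Decidable (Spec_pendrive t c out) := by unfold Spec_pendrive; infer_instance

-- ===== CLAIM =====
def Claim_equal_pendrive : Prop := ∀ (t : List Int) (c : Int), Dom_pendrive t c → Spec_pendrive t c (pendrive t c)

-- ===== LEMMAS AND PROOFS =====
theorem pendrive_key : ∀ (t : List Int) (c s : Int),
    pendrive t (c - s) = t.take (pendriveFirstOver (pendriveAccum t s) c) := by
  intro t
  induction t with
  | nil => intro c s; rfl
  | cons x xs ih =>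
    intro c s
    simp only [pendrive, pendriveAccum, pendriveFirstOver]
    by_cases h : s + x > c
    · rw [if_neg (by omega : ¬ x ≤ c - s), if_pos h]
      rfl
    · rw [if_pos (by omega : x ≤ c - s), if_neg h]
      have : c - s - x = c - (s + x) := by omega
      rw [this, ih]
      rw [(by omega : 1 + pendriveFirstOver (pendriveAccum xs (s + x)) c = (pendriveFirstOver (pendriveAccum xs (s + x)) c) + 1), List.take_succ_cons]

-- ===== VERDICT =====
theorem pendrive_spec : Claim_equal_pendrive := by
  intro t c _
  unfold Spec_pendrive pendrive_alt
  have h := pendrive_key t c 0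
  rw [sub_zero] at h
  exact h
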